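-- pv_equiv track=rewrite | github.com/raphael3653/conf_godinho | .dev/convertCSV_EDGVPro.py | constroi_subfases
-- ===== SOURCE A (Python) =====
-- def constroi_subfases(subfase, dictsubfase):
--     subfases = []
--     if subfase == "Todas":
--         for s in dictsubfase:
--             subfases.append(s)
--         return subfases
--     subfases.append(subfase)
--     def recursiva(subfase, dic, subfases):
--         if not subfase in dic:
--             return
--         for s in dic[subfase]:
--             recursiva(s, dic, subfases)
--             if s not in subfases:
--                 subfases.append(s)
--         return
--     recursiva(subfase, dictsubfase, subfases)
--     return subfases
-- ===== SOURCE B (Python) =====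
-- def constroi_subfases(subfase, dictsubfase):
--     if subfase == "Todas":
--         return list(dictsubfase)
--     out = [subfase]
--     visited = {subfase}
--     def visit(v):
--         if v in visited:
--             return
--         visited.add(v)
--         for c in dictsubfase.get(v, []):
--             visit(c)
--         out.append(v)
--     for c in dictsubfase.get(subfase, []):
--         visit(c)
--     return out
-- ===== Notes on version B (the rewrite author's own statement) =====
-- stated objective: idiomatic
-- what changed: A's recursive DFS re-enters an already-collected node every time it is reached again (only the final append is guarded by a list-membership scan); B is the standard memoized DFS with a visited set that enters each node at most once and emits the same post-order list.
import Mathlib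
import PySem

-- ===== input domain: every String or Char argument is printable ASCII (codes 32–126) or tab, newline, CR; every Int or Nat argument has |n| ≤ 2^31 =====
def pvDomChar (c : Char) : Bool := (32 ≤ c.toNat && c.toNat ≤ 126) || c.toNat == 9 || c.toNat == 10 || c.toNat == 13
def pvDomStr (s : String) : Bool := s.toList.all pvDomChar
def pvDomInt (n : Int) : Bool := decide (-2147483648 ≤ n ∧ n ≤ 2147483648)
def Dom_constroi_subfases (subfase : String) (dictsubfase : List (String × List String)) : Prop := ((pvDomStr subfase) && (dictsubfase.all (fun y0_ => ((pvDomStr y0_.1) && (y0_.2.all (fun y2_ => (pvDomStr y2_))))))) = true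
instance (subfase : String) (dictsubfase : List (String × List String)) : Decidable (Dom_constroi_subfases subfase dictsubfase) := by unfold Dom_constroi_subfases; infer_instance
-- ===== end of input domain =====

-- B replaces A's re-exploring recursive DFS by the idiomatic memoized DFS with a visited
-- set, entering each node at most once; same return value wherever A returns (Pre_
-- excludes the inputs with a cycle reachable from `subfase`, where A's recursion never
-- returns).

-- ===== PORT A =====
-- children lookup: `dic[subfase]` on the dict, `[]` when absent
def pvChildren (g : List (String × List String)) (v : String) : List String :=
  (PySem.Dict.mk g).getD v []

-- A's `for s in dic[subfase]` loop body, as a fold (h = the recursive call)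
def recAList (h : String → List String → List String) : List String → List String → List String
  | [], acc => acc
  | s :: rest, acc =>
    let a' := h s acc                   -- `recursiva(s, dic, subfases)`
    recAList h rest (if s ∈ a' then a' else a' ++ [s])  -- `if s not in subfases: append`
-- fuel-guarded transliteration of A's `recursiva` (fuel only makes the recursion total;
-- under Pre_ it is never exhausted)
def recA (g : List (String × List String)) : Nat → String → List String → List String
  | 0, _, acc => acc
  | f+1, v, acc =>
    match (PySem.Dict.mk g).get? v with
    | none => acc                          -- `if not subfase in dic: return`
    | some cs => recAList (recA g f) cs acc  -- `for s in dic[subfase]: ...`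

def constroi_subfases (subfase : String) (dictsubfase : List (String × List String)) : List String :=
  if subfase == "Todas" then
    -- `for s in dictsubfase: subfases.append(s)` (iterating a dict yields its keys)
    (PySem.Dict.mk dictsubfase).keys.foldl (fun a s => a ++ [s]) []
  else
    recA dictsubfase (dictsubfase.length + 2) subfase [subfase]

-- ===== PORT B =====
-- memoized DFS: state = (visited, out); fuel is only a totality guard
def visitBList (h : String → List String × List String → List String × List String) : List String → List String × List String → List String × List String
  | [], st => st
  | c :: rest, st => visitBList h rest (h c st)
def visitB (g : List (String × List String)) : Nat → String → List String × List String → List String × List String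
  | 0, _, st => st
  | f+1, v, st =>
    if v ∈ st.1 then st
    else
      let st' := visitBList (visitB g f) (pvChildren g v) (st.1 ++ [v], st.2)
      (st'.1, st'.2 ++ [v])

def constroi_subfases_alt (subfase : String) (dictsubfase : List (String × List String)) : List String :=
  if subfase == "Todas" then
    dictsubfase.map Prod.fst            -- `list(dictsubfase)` = the keys
  else
    (visitBList (visitB dictsubfase (dictsubfase.length + 1)) (pvChildren dictsubfase subfase)
      ([subfase], [subfase])).2

-- ===== PRECONDITION & SPEC =====
-- pvBall g n v: the nodes reachable from v in at most n steps (iterated edge-image of the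
-- graph; a declarative n-step neighbourhood, not the algorithm of either port)
def pvExpand (g : List (String × List String)) (S : List String) : List String :=
  S ++ S.flatMap (pvChildren g)
def pvBall (g : List (String × List String)) (n : Nat) (v : String) : List String :=
  (pvExpand g)^[n] [v]
-- expansion depth sufficient to saturate (1 + number of child occurrences)
def pvN (g : List (String × List String)) : Nat := (g.flatMap Prod.snd).length + 1

-- Pre_ excludes inputs with a cycle among the nodes reachable from `subfase`
-- (and subfase ≠ "Todas"): there Python A's recursion never returns (RecursionError).
def Pre_constroi_subfases (subfase : String) (dictsubfase : List (String × List String)) : Prop :=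
  subfase = "Todas" ∨
  ∀ v ∈ pvBall dictsubfase (pvN dictsubfase) subfase,
    ∀ c ∈ pvChildren dictsubfase v, v ∉ pvBall dictsubfase (pvN dictsubfase) c
instance (subfase : String) (dictsubfase : List (String × List String)) : Decidable (Pre_constroi_subfases subfase dictsubfase) := by unfold Pre_constroi_subfases; infer_instance

def pvWitness_constroi_subfases : String × (List (String × List String)) :=
  ("a", [("a", ["b", "c"]), ("b", ["c"])])

def Spec_constroi_subfases (subfase : String) (dictsubfase : List (String × List String)) (out : List String) : Prop := out = constroi_subfases_alt subfase dictsubfase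
instance (subfase : String) (dictsubfase : List (String × List String)) (out : List String) : Decidable (Spec_constroi_subfases subfase dictsubfase out) := by unfold Spec_constroi_subfases; infer_instance

-- ===== CLAIM (what is proved, stated in full; the proofs are below) =====
def Claim_equal_constroi_subfases : Prop := ∀ (subfase : String) (dictsubfase : List (String × List String)), Dom_constroi_subfases subfase dictsubfase → Pre_constroi_subfases subfase dictsubfase → Spec_constroi_subfases subfase dictsubfase (constroi_subfases subfase dictsubfase)

-- ===== LEMMAS AND PROOFS =====
-- the edge relation of the graph
def pvStep (g : List (String × List String)) (v w : String) : Prop := w ∈ pvChildren g v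
-- no node reachable from root lies on a cycle
def pvNoCyc (g : List (String × List String)) (root : String) : Prop :=
  ∀ v, Relation.ReflTransGen (pvStep g) root v → ¬ Relation.TransGen (pvStep g) v v
-- A's loop invariant: root present, every non-root element closed under children,
-- every element is root or strictly reachable from root
def pvInv (g : List (String × List String)) (root : String) (acc : List String) : Prop :=
  root ∈ acc ∧ (∀ w ∈ acc, w ≠ root → ∀ c ∈ pvChildren g w, c ∈ acc) ∧
  (∀ w ∈ acc, w = root ∨ Relation.TransGen (pvStep g) root w)
-- one fold step of A's loop
def pvAStep (g : List (String × List String)) (f : Nat) (v : String) (acc : List String) : List String :=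
  let a' := recA g f v acc
  if v ∈ a' then a' else a' ++ [v]

theorem pvBall_zero (g : List (String × List String)) (v : String) : pvBall g 0 v = [v] := rfl

theorem pvBall_succ (g : List (String × List String)) (n : Nat) (v : String) :
    pvBall g (n+1) v = pvExpand g (pvBall g n v) := Function.iterate_succ_apply' _ _ _

theorem pv_mem_expand (g : List (String × List String)) (S : List String) (x : String) :
    x ∈ pvExpand g S ↔ x ∈ S ∨ ∃ u ∈ S, x ∈ pvChildren g u := by
  simp [pvExpand, List.mem_append, List.mem_flatMap]

theorem pv_ball_mono (g : List (String × List String)) (v : String) {n m : Nat} (h : n ≤ m) :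
    pvBall g n v ⊆ pvBall g m v := by
  induction m with
  | zero => simp_all
  | succ m ih =>
    rcases Nat.lt_or_ge n (m+1) with h' | h'
    · intro x hx
      have : x ∈ pvBall g m v := ih (Nat.lt_succ_iff.mp h') hx
      rw [pvBall_succ]
      exact (pv_mem_expand g _ x).mpr (Or.inl this)
    · have : n = m + 1 := le_antisymm h h'
      subst this; exact fun x hx => hx

theorem pv_children_sub_flat (g : List (String × List String)) (v x : String)
    (hx : x ∈ pvChildren g v) : x ∈ g.flatMap Prod.snd := by
  unfold pvChildren at hx
  rw [PySem.Dict.getD_eq_get?_getD] at hx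
  cases h : (PySem.Dict.mk g).get? v with
  | none => rw [h] at hx; simp at hx
  | some cs =>
    rw [h] at hx; simp at hx
    have hmem : (v, cs) ∈ (PySem.Dict.mk g).items := PySem.Dict.mem_items_of_get?_eq_some _ h
    exact List.mem_flatMap.mpr ⟨(v, cs), hmem, hx⟩

theorem pv_ball_sub_univ (g : List (String × List String)) (v : String) (n : Nat) :
    pvBall g n v ⊆ v :: g.flatMap Prod.snd := by
  induction n with
  | zero => intro x hx; rw [pvBall_zero] at hx; simp at hx; simp [hx]
  | succ n ih =>
    intro x hx
    rw [pvBall_succ] at hx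
    rcases (pv_mem_expand g _ x).mp hx with h | ⟨u, _, hc⟩
    · exact ih h
    · exact List.mem_cons_of_mem _ (pv_children_sub_flat g u x hc)

theorem pv_expand_congr (g : List (String × List String)) (S T : List String)
    (h : ∀ x, x ∈ S ↔ x ∈ T) (x : String) : x ∈ pvExpand g S ↔ x ∈ pvExpand g T := by
  rw [pv_mem_expand, pv_mem_expand]
  constructor
  · rintro (hx | ⟨u, hu, hc⟩)
    · exact Or.inl ((h x).mp hx)
    · exact Or.inr ⟨u, (h u).mp hu, hc⟩
  · rintro (hx | ⟨u, hu, hc⟩)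
    · exact Or.inl ((h x).mpr hx)
    · exact Or.inr ⟨u, (h u).mpr hu, hc⟩

theorem pv_stable_forever (g : List (String × List String)) (v : String) (m : Nat)
    (h : ∀ x, x ∈ pvBall g m v ↔ x ∈ pvBall g (m+1) v) :
    ∀ k x, x ∈ pvBall g (m+k) v ↔ x ∈ pvBall g m v := by
  intro k
  induction k with
  | zero => intro x; rfl
  | succ k ih =>
    intro x
    have h1 : x ∈ pvBall g (m+k+1) v ↔ x ∈ pvBall g (m+1) v := by
      rw [pvBall_succ, pvBall_succ]
      exact pv_expand_congr g _ _ ih x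
    rw [show m + (k+1) = m + k + 1 by omega, h1, ← h x]

theorem pv_grow (g : List (String × List String)) (v : String) (n : Nat) :
    (∃ m < n, ∀ x, x ∈ pvBall g m v ↔ x ∈ pvBall g (m+1) v) ∨ n < (pvBall g n v).toFinset.card := by
  induction n with
  | zero =>
    right
    have : v ∈ (pvBall g 0 v).toFinset := by rw [pvBall_zero]; simp
    exact Finset.card_pos.mpr ⟨v, this⟩
  | succ n ih =>
    rcases ih with ⟨m, hm, h⟩ | hc
    · exact Or.inl ⟨m, Nat.lt_succ_of_lt hm, h⟩
    · by_cases hst : ∀ x, x ∈ pvBall g n v ↔ x ∈ pvBall g (n+1) v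
      · exact Or.inl ⟨n, Nat.lt_succ_self n, hst⟩
      · right
        have hsub : (pvBall g n v).toFinset ⊆ (pvBall g (n+1) v).toFinset := by
          intro x hx
          simp only [List.mem_toFinset] at hx ⊢
          exact pv_ball_mono g v (Nat.le_succ n) hx
        have hss : (pvBall g n v).toFinset ⊂ (pvBall g (n+1) v).toFinset := by
          refine ⟨hsub, fun hba => hst fun x => ?_⟩
          constructor
          · intro hx; exact pv_ball_mono g v (Nat.le_succ n) hx
          · intro hx
            have := hba (by simpa using hx)
            simpa using this
        have := Finset.card_lt_card hss
        omega

theorem pv_ball_saturate (g : List (String × List String)) (v : String) (n : Nat) (x : String)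
    (hx : x ∈ pvBall g n v) : x ∈ pvBall g (pvN g) v := by
  rcases Nat.le_total n (pvN g) with h | h
  · exact pv_ball_mono g v h hx
  · rcases pv_grow g v (pvN g) with ⟨m, hm, hst⟩ | hc
    · have hn : n = m + (n - m) := by omega
      have h1 : x ∈ pvBall g m v := by
        rw [hn] at hx; exact (pv_stable_forever g v m hst _ x).mp hx
      exact pv_ball_mono g v (by omega) h1
    · exfalso
      have h1 : (pvBall g (pvN g) v).toFinset ⊆ (v :: g.flatMap Prod.snd).toFinset := by
        intro x hx
        simp only [List.mem_toFinset] at hx ⊢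
        exact pv_ball_sub_univ g v _ hx
      have h2 := Finset.card_le_card h1
      have h3 := (v :: g.flatMap Prod.snd).toFinset_card_le
      simp only [List.length_cons] at h3
      unfold pvN at hc h2
      omega

theorem pv_ball_complete (g : List (String × List String)) (a b : String)
    (h : Relation.ReflTransGen (pvStep g) a b) : b ∈ pvBall g (pvN g) a := by
  have : ∃ n, b ∈ pvBall g n a := by
    induction h with
    | refl => exact ⟨0, by rw [pvBall_zero]; simp⟩
    | tail hsteps hstep ih =>
      obtain ⟨n, hn⟩ := ih
      exact ⟨n+1, by rw [pvBall_succ]; exact (pv_mem_expand g _ _).mpr (Or.inr ⟨_, hn, hstep⟩)⟩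
  obtain ⟨n, hn⟩ := this
  exact pv_ball_saturate g a n b hn

theorem pv_noCyc_of_pre (g : List (String × List String)) (root : String)
    (hpre : ∀ v ∈ pvBall g (pvN g) root, ∀ c ∈ pvChildren g v, v ∉ pvBall g (pvN g) c) :
    pvNoCyc g root := by
  intro v hrv hcyc
  obtain ⟨c, hstep, hrc⟩ := (Relation.TransGen.head'_iff).mp hcyc
  exact hpre v (pv_ball_complete g root v hrv) c hstep (pv_ball_complete g c v hrc)

theorem pv_children_eq_of_get (g : List (String × List String)) (v : String) (cs : List String)
    (h : (PySem.Dict.mk g).get? v = some cs) : pvChildren g v = cs := by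
  unfold pvChildren; rw [PySem.Dict.getD_eq_get?_getD, h]; rfl

theorem pv_children_eq_nil (g : List (String × List String)) (v : String)
    (h : (PySem.Dict.mk g).get? v = none) : pvChildren g v = [] := by
  unfold pvChildren; rw [PySem.Dict.getD_eq_get?_getD, h]; rfl

theorem pv_noop_list (g : List (String × List String)) (root : String)
    (h : String → List String → List String)
    (hnode : ∀ (w : String) (acc : List String), pvInv g root acc → w ∈ acc → w ≠ root → h w acc = acc) :
    ∀ (cs acc : List String), pvInv g root acc → (∀ c ∈ cs, c ∈ acc ∧ c ≠ root) →
      recAList h cs acc = acc := by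
  intro cs
  induction cs with
  | nil => intro acc _ _; rfl
  | cons c rest ih =>
    intro acc hinv hcs
    have hc := hcs c (List.mem_cons_self)
    show recAList h rest (if c ∈ h c acc then h c acc else h c acc ++ [c]) = acc
    rw [hnode c acc hinv hc.1 hc.2, if_pos hc.1]
    exact ih acc hinv (fun c' h' => hcs c' (List.mem_cons_of_mem _ h'))

theorem pv_noop (g : List (String × List String)) (root : String) (hnc : pvNoCyc g root) (f : Nat) :
    (∀ (w : String) (acc : List String), pvInv g root acc → w ∈ acc → w ≠ root → recA g f w acc = acc)
    ∧ (∀ (cs acc : List String), pvInv g root acc → (∀ c ∈ cs, c ∈ acc ∧ c ≠ root) → recAList (recA g f) cs acc = acc) := by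
  induction f with
  | zero =>
    have hnode : ∀ (w : String) (acc : List String), pvInv g root acc → w ∈ acc → w ≠ root →
        recA g 0 w acc = acc := fun _ _ _ _ _ => rfl
    exact ⟨hnode, pv_noop_list g root _ hnode⟩
  | succ f ih =>
    have hnode : ∀ (w : String) (acc : List String), pvInv g root acc → w ∈ acc → w ≠ root →
        recA g (f+1) w acc = acc := by
      intro w acc hinv hw hwr
      show (match (PySem.Dict.mk g).get? w with
            | none => acc | some cs => recAList (recA g f) cs acc) = acc
      cases h : (PySem.Dict.mk g).get? w with
      | none => rfl
      | some cs =>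
        apply ih.2 cs acc hinv
        intro c hc
        have hcc : c ∈ pvChildren g w := by rw [pv_children_eq_of_get g w cs h]; exact hc
        have hcacc : c ∈ acc := hinv.2.1 w hw hwr c hcc
        have hrw : Relation.TransGen (pvStep g) root w := by
          rcases hinv.2.2 w hw with h' | h'
          · exact absurd h' hwr
          · exact h'
        refine ⟨hcacc, fun hcr => ?_⟩
        subst hcr
        exact hnc c (Relation.ReflTransGen.refl) (hrw.tail hcc)
    exact ⟨hnode, pv_noop_list g root _ hnode⟩

theorem pv_nodup_len {α : Type} [DecidableEq α] (P l : List α) (hnd : P.Nodup)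
    (hsub : ∀ p ∈ P, p ∈ l) : P.length ≤ l.length := by
  calc P.length = P.toFinset.card := (List.toFinset_card_of_nodup hnd).symm
    _ ≤ l.toFinset.card := Finset.card_le_card (fun x hx => by
        simp only [List.mem_toFinset] at hx ⊢; exact hsub x hx)
    _ ≤ l.length := l.toFinset_card_le

theorem pv_mem_AStep (g : List (String × List String)) (f : Nat) (v : String) (acc : List String) :
    v ∈ pvAStep g f v acc := by
  unfold pvAStep
  by_cases h : v ∈ recA g f v acc <;> simp [h]

theorem pv_main (g : List (String × List String)) (root : String) (hnc : pvNoCyc g root) (f : Nat) :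
    (∀ (v : String) (acc vis P : List String), pvInv g root acc →
      (∀ x, x ∈ vis ↔ x ∈ acc ∨ x ∈ P) →
      P.Nodup → (∀ p ∈ P, p ∈ g.map Prod.fst) →
      (∀ p ∈ P, Relation.TransGen (pvStep g) p v) →
      Relation.TransGen (pvStep g) root v →
      g.length + 1 ≤ f + P.length →
      (visitB g f v (vis, acc)).2 = pvAStep g f v acc
      ∧ (∀ x, x ∈ (visitB g f v (vis, acc)).1 ↔ x ∈ pvAStep g f v acc ∨ x ∈ P)
      ∧ pvInv g root (pvAStep g f v acc)
      ∧ (∀ x ∈ acc, x ∈ pvAStep g f v acc)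
      ∧ (∀ x ∈ pvAStep g f v acc, x ∈ acc ∨ x = v ∨ Relation.TransGen (pvStep g) v x))
    ∧ (∀ (cs acc vis P : List String), pvInv g root acc →
      (∀ x, x ∈ vis ↔ x ∈ acc ∨ x ∈ P) →
      P.Nodup → (∀ p ∈ P, p ∈ g.map Prod.fst) →
      (∀ c ∈ cs, Relation.TransGen (pvStep g) root c ∧ ∀ p ∈ P, Relation.TransGen (pvStep g) p c) →
      g.length + 1 ≤ f + P.length →
      (visitBList (visitB g f) cs (vis, acc)).2 = recAList (recA g f) cs acc
      ∧ (∀ x, x ∈ (visitBList (visitB g f) cs (vis, acc)).1 ↔ x ∈ recAList (recA g f) cs acc ∨ x ∈ P)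
      ∧ pvInv g root (recAList (recA g f) cs acc)
      ∧ (∀ x ∈ acc, x ∈ recAList (recA g f) cs acc)
      ∧ (∀ x ∈ recAList (recA g f) cs acc, x ∈ acc ∨ ∃ c ∈ cs, x = c ∨ Relation.TransGen (pvStep g) c x)
      ∧ (∀ c ∈ cs, c ∈ recAList (recA g f) cs acc)) := by
  induction f with
  | zero =>
    have hlen : ∀ P : List String, P.Nodup → (∀ p ∈ P, p ∈ g.map Prod.fst) →
        P.length ≤ g.length := by
      intro P hnd hkeys
      have := pv_nodup_len P (g.map Prod.fst) hnd hkeys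
      simpa using this
    constructor
    · intro v acc vis P _ _ hnd hkeys _ _ hfuel
      exact absurd hfuel (by have := hlen P hnd hkeys; omega)
    · intro cs acc vis P _ _ hnd hkeys _ hfuel
      exact absurd hfuel (by have := hlen P hnd hkeys; omega)
  | succ f ih =>
    have hnode : ∀ (v : String) (acc vis P : List String), pvInv g root acc →
        (∀ x, x ∈ vis ↔ x ∈ acc ∨ x ∈ P) →
        P.Nodup → (∀ p ∈ P, p ∈ g.map Prod.fst) →
        (∀ p ∈ P, Relation.TransGen (pvStep g) p v) →
        Relation.TransGen (pvStep g) root v →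
        g.length + 1 ≤ (f+1) + P.length →
        (visitB g (f+1) v (vis, acc)).2 = pvAStep g (f+1) v acc
        ∧ (∀ x, x ∈ (visitB g (f+1) v (vis, acc)).1 ↔ x ∈ pvAStep g (f+1) v acc ∨ x ∈ P)
        ∧ pvInv g root (pvAStep g (f+1) v acc)
        ∧ (∀ x ∈ acc, x ∈ pvAStep g (f+1) v acc)
        ∧ (∀ x ∈ pvAStep g (f+1) v acc, x ∈ acc ∨ x = v ∨ Relation.TransGen (pvStep g) v x) := by
      intro v acc vis P hinv hvis hnd hkeys hpv hrv hfuel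
      have hrvr : Relation.ReflTransGen (pvStep g) root v := hrv.to_reflTransGen
      have hvroot : v ≠ root := by
        intro h; subst h; exact hnc v Relation.ReflTransGen.refl hrv
      by_cases hvvis : v ∈ vis
      · have hvacc : v ∈ acc := by
          rcases (hvis v).mp hvvis with h | h
          · exact h
          · exact absurd (hpv v h) (hnc v hrvr)
        have hstep : pvAStep g (f+1) v acc = acc := by
          unfold pvAStep
          rw [(pv_noop g root hnc (f+1)).1 v acc hinv hvacc hvroot]
          exact if_pos hvacc
        have hB : visitB g (f+1) v (vis, acc) = (vis, acc) := by
          simp only [visitB]; rw [if_pos hvvis]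
        rw [hB, hstep]
        exact ⟨rfl, hvis, hinv, fun x hx => hx, fun x hx => Or.inl hx⟩
      · have hvacc : v ∉ acc := fun h => hvvis ((hvis v).mpr (Or.inl h))
        have hvP : v ∉ P := fun h => hvvis ((hvis v).mpr (Or.inr h))
        have hB : visitB g (f+1) v (vis, acc) =
            ((visitBList (visitB g f) (pvChildren g v) (vis ++ [v], acc)).1,
             (visitBList (visitB g f) (pvChildren g v) (vis ++ [v], acc)).2 ++ [v]) := by
          simp only [visitB]; rw [if_neg hvvis]
        cases hget : (PySem.Dict.mk g).get? v with
        | none =>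
          have hch : pvChildren g v = [] := pv_children_eq_nil g v hget
          have hA : recA g (f+1) v acc = acc := by simp only [recA]; rw [hget]
          have hAS : pvAStep g (f+1) v acc = acc ++ [v] := by
            unfold pvAStep; rw [hA]; exact if_neg hvacc
          rw [hB, hch, hAS]
          simp only [visitBList]
          refine ⟨trivial, ?_, ?_, ?_, ?_⟩
          · intro x
            have := hvis x
            simp only [List.mem_append, List.mem_singleton] at *
            tauto
          · refine ⟨List.mem_append_left _ hinv.1, ?_, ?_⟩
            · intro w hw hwr c hc
              rcases List.mem_append.mp hw with h | h
              · exact List.mem_append_left _ (hinv.2.1 w h hwr c hc)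
              · have : w = v := List.mem_singleton.mp h
                subst this
                rw [hch] at hc; cases hc
            · intro w hw
              rcases List.mem_append.mp hw with h | h
              · exact hinv.2.2 w h
              · have : w = v := List.mem_singleton.mp h
                subst this; exact Or.inr hrv
          · exact fun x hx => List.mem_append_left _ hx
          · intro x hx
            rcases List.mem_append.mp hx with h | h
            · exact Or.inl h
            · exact Or.inr (Or.inl (List.mem_singleton.mp h))
        | some cs =>
          have hch : pvChildren g v = cs := pv_children_eq_of_get g v cs hget
          have hvkey : v ∈ g.map Prod.fst := by
            by_contra hnk
            have : (PySem.Dict.mk g).get? v = none := by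
              rw [PySem.Dict.get?_eq_none_iff_not_mem_keys]
              simpa [PySem.Dict.keys, PySem.Dict.items] using hnk
            rw [this] at hget; cases hget
          have hstepc : ∀ c ∈ cs, pvStep g v c := by
            intro c hc; show c ∈ pvChildren g v; rw [hch]; exact hc
          have hres := ih.2 cs acc (vis ++ [v]) (P ++ [v]) hinv
            (by intro x
                have := hvis x
                simp only [List.mem_append, List.mem_singleton] at *
                tauto)
            (hnd.append (List.nodup_singleton v)
              (fun a ha hav => absurd ((List.mem_singleton.mp hav) ▸ ha) hvP))
            (by intro p hp
                rcases List.mem_append.mp hp with h | h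
                · exact hkeys p h
                · have : p = v := List.mem_singleton.mp h
                  subst this; exact hvkey)
            (by intro c hc
                refine ⟨hrv.tail (hstepc c hc), ?_⟩
                intro p hp
                rcases List.mem_append.mp hp with h | h
                · exact (hpv p h).tail (hstepc c hc)
                · have : p = v := List.mem_singleton.mp h
                  subst this; exact Relation.TransGen.single (hstepc c hc))
            (by simp only [List.length_append, List.length_singleton]; omega)
          obtain ⟨hEq, hVis, hInv, hSub, hRange, hCs⟩ := hres
          have hA : recA g (f+1) v acc = recAList (recA g f) cs acc := by
            simp only [recA]; rw [hget]
          have hva' : v ∉ recAList (recA g f) cs acc := by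
            intro hv
            rcases hRange v hv with h | ⟨c, hcmem, h | h⟩
            · exact hvacc h
            · subst h
              exact hnc v hrvr (Relation.TransGen.single (hstepc v hcmem))
            · exact hnc v hrvr (Relation.TransGen.head (hstepc c hcmem) h)
          have hAS : pvAStep g (f+1) v acc = recAList (recA g f) cs acc ++ [v] := by
            unfold pvAStep; rw [hA]; exact if_neg hva'
          rw [hB, hch, hAS, hEq]
          refine ⟨rfl, ?_, ?_, ?_, ?_⟩
          · intro x
            have := hVis x
            simp only [List.mem_append, List.mem_singleton] at *
            tauto
          · refine ⟨List.mem_append_left _ hInv.1, ?_, ?_⟩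
            · intro w hw hwr c hc
              rcases List.mem_append.mp hw with h | h
              · exact List.mem_append_left _ (hInv.2.1 w h hwr c hc)
              · have : w = v := List.mem_singleton.mp h
                subst this
                rw [hch] at hc
                exact List.mem_append_left _ (hCs c hc)
            · intro w hw
              rcases List.mem_append.mp hw with h | h
              · exact hInv.2.2 w h
              · have : w = v := List.mem_singleton.mp h
                subst this; exact Or.inr hrv
          · exact fun x hx => List.mem_append_left _ (hSub x hx)
          · intro x hx
            rcases List.mem_append.mp hx with h | h
            · rcases hRange x h with h' | ⟨c, hcmem, h' | h'⟩
              · exact Or.inl h'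
              · subst h'
                exact Or.inr (Or.inr (Relation.TransGen.single (hstepc x hcmem)))
              · exact Or.inr (Or.inr (Relation.TransGen.head (hstepc c hcmem) h'))
            · exact Or.inr (Or.inl (List.mem_singleton.mp h))
    refine ⟨hnode, ?_⟩
    intro cs
    induction cs with
    | nil =>
      intro acc vis P hinv hvis _ _ _ _
      exact ⟨rfl, hvis, hinv, fun x hx => hx, fun x hx => Or.inl hx, by simp⟩
    | cons c rest ihcs =>
      intro acc vis P hinv hvis hnd hkeys hcs hfuel
      have hc := hcs c List.mem_cons_self
      obtain ⟨h1, h2, h3, h4, h5⟩ :=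
        hnode c acc vis P hinv hvis hnd hkeys hc.2 hc.1 hfuel
      have hpair : visitB g (f+1) c (vis, acc) =
          ((visitB g (f+1) c (vis, acc)).1, pvAStep g (f+1) c acc) := by
        rw [← h1]
      obtain ⟨H1, H2, H3, H4, H5, H6⟩ :=
        ihcs (pvAStep g (f+1) c acc) (visitB g (f+1) c (vis, acc)).1 P h3 h2 hnd hkeys
          (fun c' h' => hcs c' (List.mem_cons_of_mem _ h')) hfuel
      have hBstep : visitBList (visitB g (f+1)) (c :: rest) (vis, acc) =
          visitBList (visitB g (f+1)) rest ((visitB g (f+1) c (vis, acc)).1, pvAStep g (f+1) c acc) := by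
        show visitBList (visitB g (f+1)) rest (visitB g (f+1) c (vis, acc)) = _
        rw [hpair]
      have hAstep : recAList (recA g (f+1)) (c :: rest) acc =
          recAList (recA g (f+1)) rest (pvAStep g (f+1) c acc) := rfl
      rw [hBstep, hAstep]
      refine ⟨H1, H2, H3, fun x hx => H4 x (h4 x hx), ?_, ?_⟩
      · intro x hx
        rcases H5 x hx with h | ⟨c', hc', h'⟩
        · rcases h5 x h with h' | h' | h'
          · exact Or.inl h'
          · exact Or.inr ⟨c, List.mem_cons_self, Or.inl h'⟩
          · exact Or.inr ⟨c, List.mem_cons_self, Or.inr h'⟩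
        · exact Or.inr ⟨c', List.mem_cons_of_mem _ hc', h'⟩
      · intro c' hc'
        rcases List.mem_cons.mp hc' with h | h
        · subst h
          exact H4 c' (pv_mem_AStep g (f+1) c' acc)
        · exact H6 c' h

-- ===== VERDICT (by name: the statement is the Claim_ definition above) =====
theorem pv_foldl_append (l acc : List String) :
    l.foldl (fun a s => a ++ [s]) acc = acc ++ l := by
  induction l generalizing acc with
  | nil => simp
  | cons a t ih => simp only [List.foldl_cons]; rw [ih]; simp

theorem constroi_subfases_spec : Claim_equal_constroi_subfases := by
  unfold Claim_equal_constroi_subfases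
  intro subfase g _ hpre
  unfold Spec_constroi_subfases constroi_subfases constroi_subfases_alt
  by_cases ht : subfase = "Todas"
  · simp only [ht, beq_self_eq_true, if_true]
    rw [pv_foldl_append]
    simp [PySem.Dict.keys]
  · have htb : (subfase == "Todas") = false := by simpa using ht
    rw [htb]
    simp only [Bool.false_eq_true, if_false]
    rcases hpre with h | hpre
    · exact absurd h ht
    have hnc : pvNoCyc g subfase := pv_noCyc_of_pre g subfase hpre
    have hinv : pvInv g subfase [subfase] := by
      refine ⟨List.mem_singleton.mpr rfl, ?_, ?_⟩
      · intro w hw hwr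
        exact absurd (List.mem_singleton.mp hw) hwr
      · intro w hw
        exact Or.inl (List.mem_singleton.mp hw)
    cases hget : (PySem.Dict.mk g).get? subfase with
    | none =>
      have hch : pvChildren g subfase = [] := pv_children_eq_nil g subfase hget
      have hA : recA g (g.length + 2) subfase [subfase] = [subfase] := by
        show recA g (g.length + 1 + 1) subfase [subfase] = [subfase]
        simp only [recA]; rw [hget]
      rw [hA, hch]
      rfl
    | some cs =>
      have hch : pvChildren g subfase = cs := pv_children_eq_of_get g subfase cs hget
      have hA : recA g (g.length + 2) subfase [subfase]
          = recAList (recA g (g.length + 1)) cs [subfase] := by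
        show recA g (g.length + 1 + 1) subfase [subfase] = _
        simp only [recA]; rw [hget]
      have hres := (pv_main g subfase hnc (g.length + 1)).2 cs [subfase] [subfase] [] hinv
        (by intro x; simp)
        List.nodup_nil
        (by intro p hp; cases hp)
        (by intro c hc
            have hstepc : pvStep g subfase c := by
              show c ∈ pvChildren g subfase; rw [hch]; exact hc
            exact ⟨Relation.TransGen.single hstepc, by intro p hp; cases hp⟩)
        (by simp)
      rw [hA, hch, hres.1]
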